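-- pv_equiv track=rewrite | github.com/kdmontero/aoc | 2019/day12.py | get_gravity
-- ===== SOURCE A (Python) =====
-- def get_gravity(axis_pos):
--     axis_grav = []
--     for moon in axis_pos:
--         grav = 0
--         for other in axis_pos:
--             if moon is not other and moon < other:
--                 grav += 1
--             elif moon is not other and moon > other:
--                 grav -= 1
--         axis_grav.append(grav)
--     return axis_grav
-- ===== SOURCE B (Python) =====
-- def get_gravity(axis_pos):
--     n = len(axis_pos)
--     count = {}
--     for v in axis_pos:
--         count[v] = count.get(v, 0) + 1
--     grav = {}
--     less = 0
--     for v in sorted(count):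
--         c = count[v]
--         grav[v] = (n - less - c) - less
--         less += c
--     return [grav[v] for v in axis_pos]
-- ===== Notes on version B (the rewrite author's own statement) =====
-- stated objective: faster
-- what changed: Replaces the quadratic all-pairs comparison with one counting dict, a sort of the distinct values and a prefix-sum pass that yields (#greater - #less) per value, then a lookup per element.
import Mathlib
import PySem

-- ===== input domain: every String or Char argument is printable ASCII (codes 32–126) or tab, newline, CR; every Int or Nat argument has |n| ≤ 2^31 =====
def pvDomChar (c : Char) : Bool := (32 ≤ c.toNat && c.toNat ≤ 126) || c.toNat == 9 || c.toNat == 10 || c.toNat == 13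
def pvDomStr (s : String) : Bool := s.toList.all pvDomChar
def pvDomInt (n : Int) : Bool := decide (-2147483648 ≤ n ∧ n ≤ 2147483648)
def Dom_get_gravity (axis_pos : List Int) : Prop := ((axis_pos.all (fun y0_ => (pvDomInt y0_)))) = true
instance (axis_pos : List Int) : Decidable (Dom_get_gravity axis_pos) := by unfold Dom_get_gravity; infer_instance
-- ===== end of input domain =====

-- B replaces A's O(n^2) all-pairs comparison by a counting dict + sort of distinct values + prefix sums (measured faster; equivalence of return values proved below).

-- ===== PORT A =====
-- 'moon is not other and moon < other' is exact as 'moon < other': identity of int objects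
-- can only coincide when the values are equal, and then neither '<' nor '>' holds.
def get_gravity (axis_pos : List Int) : List Int :=
  axis_pos.foldl (fun axis_grav moon =>
    axis_grav ++ [axis_pos.foldl (fun grav other =>
      if moon < other then grav + 1
      else if moon > other then grav - 1
      else grav) 0]) []

-- ===== PORT B =====
def get_gravity_alt (axis_pos : List Int) : List Int :=
  let n : Int := axis_pos.length
  let count : PySem.Dict Int Int :=
    axis_pos.foldl (fun d v => d.insert v (d.getD v 0 + 1)) PySem.Dict.empty
  let st : PySem.Dict Int Int × Int :=
    (PySem.List.sorted count.keys (fun x => x) false).foldl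
      (fun p v =>
        let c := count.getD v 0
        (p.1.insert v ((n - p.2 - c) - p.2), p.2 + c))
      (PySem.Dict.empty, 0)
  -- grav[v] : the key v is always present (every element's value is a key of count), so getD is exact
  axis_pos.map (fun v => st.1.getD v 0)

-- ===== PRECONDITION & SPEC =====
def Spec_get_gravity (axis_pos : List Int) (out : List Int) : Prop := out = get_gravity_alt axis_pos
instance (axis_pos : List Int) (out : List Int) : Decidable (Spec_get_gravity axis_pos out) := by unfold Spec_get_gravity; infer_instance

-- ===== CLAIM (what is proved, stated in full; the proofs are below) =====
def Claim_equal_get_gravity : Prop := ∀ (axis_pos : List Int), Dom_get_gravity axis_pos → Spec_get_gravity axis_pos (get_gravity axis_pos)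

-- ===== LEMMAS AND PROOFS =====

-- number of elements greater than v minus number less than v, as A's inner loop computes it
def gravVal (xs : List Int) (v : Int) : Int :=
  (xs.countP (fun w => decide (v < w)) : Int) - (xs.countP (fun w => decide (w < v)) : Int)

-- A's inner loop
lemma innerA (xs : List Int) (moon : Int) (acc : Int) :
    xs.foldl (fun grav other =>
      if moon < other then grav + 1
      else if moon > other then grav - 1
      else grav) acc = acc + gravVal xs moon := by
  induction xs generalizing acc with
  | nil => simp [gravVal]
  | cons x t ih =>
    simp only [List.foldl_cons, gravVal, List.countP_cons] at *
    rcases lt_trichotomy moon x with h | h | h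
    · have h' : ¬ x < moon := not_lt.mpr (le_of_lt h)
      rw [if_pos h, ih]
      simp only [h, h', decide_true, decide_false, if_true, if_false]
      push_cast; ring
    · subst h
      rw [if_neg (lt_irrefl moon), if_neg (lt_irrefl moon), ih]
      simp only [lt_irrefl, decide_false, if_false]
      push_cast
      ring
    · have h' : ¬ moon < x := not_lt.mpr (le_of_lt h)
      rw [if_neg h', if_pos h, ih]
      simp only [h, h', decide_true, decide_false, if_true, if_false]
      push_cast; ring

-- length splits into three parts at any pivot
lemma trichotomy_count (xs : List Int) (v : Int) :
    (xs.length : Int) = (xs.countP (fun w => decide (w < v)) : Int)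
      + (xs.count v : Int) + (xs.countP (fun w => decide (v < w)) : Int) := by
  induction xs with
  | nil => simp
  | cons x t ih =>
    simp only [List.countP_cons, List.count_cons, List.length_cons]
    rcases lt_trichotomy x v with h | h | h
    · simp [h, not_lt.mpr (le_of_lt h), (ne_of_lt h)]; push_cast; omega
    · subst h; simp [lt_irrefl]; push_cast; omega
    · simp [h, not_lt.mpr (le_of_lt h), (ne_of_gt h)]; push_cast; omega

-- the B fold step, abstracted over the fixed list xs
def stepB (xs : List Int) (p : PySem.Dict Int Int × Int) (k : Int) : PySem.Dict Int Int × Int :=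
  (p.1.insert k (((xs.length : Int) - p.2 - (xs.count k : Int)) - p.2), p.2 + (xs.count k : Int))

-- the fold never touches keys outside ks
lemma fold_preserve (xs ks : List Int) (d : PySem.Dict Int Int) (less : Int)
    (v : Int) (hv : v ∉ ks) :
    ((ks.foldl (stepB xs) (d, less)).1).getD v 0 = d.getD v 0 := by
  induction ks generalizing d less with
  | nil => rfl
  | cons k t ih =>
    simp only [List.foldl_cons, stepB]
    rw [ih _ _ (fun h => hv (List.mem_cons_of_mem _ h))]
    have hne : v ≠ k := fun h => hv (h ▸ List.mem_cons_self)
    simp [PySem.Dict.getD_insert_of_ne, hne]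

-- splitting the membership conjunct at the head of a strictly sorted key list
lemma countP_split (r : List Int) (u k : Int) (t : List Int) (hku : k < u) (hkt : k ∉ t) :
    r.countP (fun w => decide (w < u) && decide (w ∈ k :: t))
      = r.countP (fun w => decide (w = k)) + r.countP (fun w => decide (w < u) && decide (w ∈ t)) := by
  induction r with
  | nil => rfl
  | cons x r ih =>
    simp only [List.countP_cons]
    rw [ih]
    by_cases hxk : x = k
    · subst hxk
      simp [hku, hkt]
      omega
    · have hmem : (x ∈ k :: t) ↔ (x ∈ t) := by simp [hxk]
      by_cases hxt : x ∈ t <;> by_cases hxu : x < u <;> simp [hxk, hxt, hxu, hmem] <;> omega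

-- main invariant: on a strictly increasing key list, the fold stores gravVal at every key
lemma fold_spec (xs ks : List Int) (d : PySem.Dict Int Int) (less : Int)
    (hks : ks.Pairwise (· < ·))
    (hless : ∀ u ∈ ks, less = (xs.countP (fun w => decide (w < u)) : Int)
        - (xs.countP (fun w => decide (w < u) && decide (w ∈ ks)) : Int))
    (v : Int) (hv : v ∈ ks) :
    ((ks.foldl (stepB xs) (d, less)).1).getD v 0 = gravVal xs v := by
  induction ks generalizing d less with
  | nil => cases hv
  | cons k t ih =>
    rcases List.pairwise_cons.mp hks with ⟨hk, ht⟩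
    simp only [List.foldl_cons]
    rcases List.mem_cons.mp hv with rfl | hvt
    · -- v = k : stored now, untouched later (k ∉ t since t's elements are > k)
      have hknt : v ∉ t := fun h => lt_irrefl v (hk v h)
      rw [fold_preserve xs t _ _ v hknt]
      simp only [stepB]
      rw [PySem.Dict.getD_insert_self]
      have hl := hless v List.mem_cons_self
      have hz : (xs.countP (fun w => decide (w < v) && decide (w ∈ v :: t)) : Int) = 0 := by
        have : xs.countP (fun w => decide (w < v) && decide (w ∈ v :: t)) = 0 := by
          rw [List.countP_eq_zero]
          intro w _ hw
          simp only [Bool.and_eq_true, decide_eq_true_eq] at hw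
          obtain ⟨hw1', hw2⟩ := hw
          rcases List.mem_cons.mp hw2 with rfl | hwt
          · exact lt_irrefl _ hw1'
          · exact absurd (hk w hwt) (not_lt.mpr (le_of_lt hw1'))
        exact_mod_cast this
      rw [hz, sub_zero] at hl
      have htri := trichotomy_count xs v
      simp only [gravVal]
      omega
    · -- v ∈ t : recurse with the updated state
      refine ih _ _ ht ?_ hvt
      intro u hu
      have hl := hless u (List.mem_cons_of_mem _ hu)
      have hsplit : (xs.countP (fun w => decide (w < u) && decide (w ∈ k :: t)) : Int)
          = (xs.count k : Int) + (xs.countP (fun w => decide (w < u) && decide (w ∈ t)) : Int) := by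
        rw [countP_split xs u k t (hk u hu) (fun h => lt_irrefl k (hk k h))]
        have hcc : xs.countP (fun w => decide (w = k)) = xs.count k := by
          rw [List.count_eq_countP]
          apply List.countP_congr
          intro w _
          by_cases h : w = k
          · simp [h]
          · simp [h, Ne.symm h]
        rw [hcc]
        push_cast
        ring
      rw [hsplit] at hl
      omega

-- countP over xs agrees when the membership conjunct always holds
lemma countP_mem_true (xs : List Int) (u : Int) (ks : List Int)
    (h : ∀ w ∈ xs, w ∈ ks) :
    xs.countP (fun w => decide (w < u) && decide (w ∈ ks)) = xs.countP (fun w => decide (w < u)) := by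
  apply List.countP_congr
  intro w hw
  simp [h w hw]

-- B's per-element value
lemma altB_getD (xs : List Int) (v : Int) (hv : v ∈ xs) :
    (((PySem.List.sorted (PySem.Dict.keys (xs.foldl (fun (d : PySem.Dict Int Int) w => d.insert w (d.getD w 0 + 1)) PySem.Dict.empty)) (fun x => x) false).foldl
        (stepB xs) (PySem.Dict.empty, 0)).1).getD v 0 = gravVal xs v := by
  simp only [PySem.Dict.foldl_insert_getD_add_one_eq_counter, PySem.Dict.keys_counter]
  set ks := PySem.List.sorted (PySem.Set.ofList xs) (fun x => x) false with hksdef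
  have hmem : ∀ w, w ∈ ks ↔ w ∈ xs := by
    intro w
    rw [hksdef, PySem.List.mem_sorted, PySem.Set.mem_ofList]
  apply fold_spec xs ks _ _ (PySem.List.sorted_ofList_pairwise_lt xs)
  · intro u hu
    rw [countP_mem_true xs u ks (fun w hw => (hmem w).mpr hw)]
    ring
  · exact (hmem v).mpr hv

-- ===== VERDICT (by name: the statement is the Claim_ definition above) =====
theorem get_gravity_spec : Claim_equal_get_gravity := by
  intro axis_pos _
  unfold Spec_get_gravity get_gravity get_gravity_alt
  dsimp only
  rw [PySem.List.foldl_append_singleton_eq_map]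
  have hfun : (fun (p : PySem.Dict Int Int × Int) v =>
      ((p.1.insert v (((axis_pos.length : Int) - p.2
          - (axis_pos.foldl (fun d w => d.insert w (d.getD w 0 + 1)) PySem.Dict.empty).getD v 0) - p.2),
        p.2 + (axis_pos.foldl (fun d w => d.insert w (d.getD w 0 + 1)) PySem.Dict.empty).getD v 0)
          : PySem.Dict Int Int × Int))
      = stepB axis_pos := by
    funext p v
    simp only [stepB, PySem.Dict.getD_foldl_insert_add_one]
    simp [pysem]
  rw [hfun]
  apply List.map_congr_left
  intro moon hmoon
  rw [innerA axis_pos moon 0, zero_add]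
  exact (altB_getD axis_pos moon hmoon).symm
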